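-- pv_equiv track=rewrite | github.com/matteoborrotti/automaticlabeling | code/custom_libraries/baptism_functions.py | allocation_topwords_based
-- ===== SOURCE A (Python) =====
-- def allocation_topwords_based(diz_topwords, described_topics, minDistanceWords):
--     diz_vtopic = {}
--     for topic_description in described_topics:
--         Vtopic = topic_description[0]
--         top_words_Vtopic = topic_description[1]
--         diz_vtopic[Vtopic] = {}
--         for rtopic in diz_topwords:
--             diz_vtopic[Vtopic][rtopic] = 0
--             for tuple_word in top_words_Vtopic:
--                 if tuple_word[0] in diz_topwords[rtopic]:
--                     diz_vtopic[Vtopic][rtopic] += 1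
--     diz_vtopic_max = {}
--     for vtopic in diz_vtopic:
--         diz_vtopic_max[vtopic] = {}
--         sorted_vtopic = sorted(diz_vtopic[vtopic].items(), key=lambda x: x[1], reverse=True)
--         if sorted_vtopic[0][1] - sorted_vtopic[1][1] >= minDistanceWords:
--             diz_vtopic_max[vtopic] = {sorted_vtopic[0][0]: sorted_vtopic[0][1]}
--
--     return diz_vtopic_max
-- ===== SOURCE B (Python) =====
-- def allocation_topwords_based(diz_topwords, described_topics, minDistanceWords):
--     # inverted index: word -> list of rtopics whose top-word list contains it
--     index = {}
--     for rtopic, words in diz_topwords.items():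
--         for w in set(words):
--             index.setdefault(w, []).append(rtopic)
--     result = {}
--     for topic_description in described_topics:
--         vtopic = topic_description[0]
--         counts = dict.fromkeys(diz_topwords, 0)
--         for tuple_word in topic_description[1]:
--             for rtopic in index.get(tuple_word[0], ()):
--                 counts[rtopic] += 1
--         # single pass: first-maximal rtopic and the runner-up count
--         it = iter(counts.items())
--         best_r, best_c = next(it)
--         second_c = None
--         for r, c in it:
--             if c > best_c:
--                 best_r, best_c, second_c = r, c, best_c
--             elif second_c is None or c > second_c:
--                 second_c = c
--         result[vtopic] = {best_r: best_c} if best_c - second_c >= minDistanceWords else {}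
--     return result
-- ===== Notes on version B (the rewrite author's own statement) =====
-- stated objective: faster
-- what changed: B builds an inverted word->rtopics index once and increments per-rtopic counters per top word, then picks the dominant rtopic and runner-up count in one pass instead of A's scan of every rtopic's word list per top word per vtopic and a full sort per vtopic.
import Mathlib
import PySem

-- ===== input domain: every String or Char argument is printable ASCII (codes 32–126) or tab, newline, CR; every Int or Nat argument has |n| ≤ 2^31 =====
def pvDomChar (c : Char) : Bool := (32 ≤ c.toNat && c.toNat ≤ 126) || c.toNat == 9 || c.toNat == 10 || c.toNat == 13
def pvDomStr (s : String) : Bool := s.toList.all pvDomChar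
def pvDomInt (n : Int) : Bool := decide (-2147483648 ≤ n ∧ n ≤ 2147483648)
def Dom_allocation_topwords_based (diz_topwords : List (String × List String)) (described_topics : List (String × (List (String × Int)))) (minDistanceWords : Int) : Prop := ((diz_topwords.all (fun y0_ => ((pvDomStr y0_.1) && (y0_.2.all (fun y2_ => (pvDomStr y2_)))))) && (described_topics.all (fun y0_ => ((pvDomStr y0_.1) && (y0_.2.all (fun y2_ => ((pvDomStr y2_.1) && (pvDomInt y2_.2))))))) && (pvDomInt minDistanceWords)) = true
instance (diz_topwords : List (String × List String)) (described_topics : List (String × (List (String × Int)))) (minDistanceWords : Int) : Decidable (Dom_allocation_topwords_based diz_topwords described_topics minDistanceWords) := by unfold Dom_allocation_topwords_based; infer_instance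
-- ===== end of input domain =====

-- B replaces A's scan of every rtopic word list per top word and per-vtopic sort by a
-- word→rtopics inverted index with counter increments and a single-pass best/runner-up scan
-- (objective: faster).

-- ===== PORT A =====
def allocation_topwords_based (diz_topwords : List (String × List String)) (described_topics : List (String × (List (String × Int)))) (minDistanceWords : Int) : List (String × List (String × Int)) :=
  let dz : PySem.Dict String (List String) := PySem.Dict.ofList diz_topwords
  let diz_vtopic : PySem.Dict String (PySem.Dict String Int) :=
    described_topics.foldl (fun dv topic_description =>
      let Vtopic := topic_description.1
      let top_words_Vtopic := topic_description.2
      let dv := dv.insert Vtopic PySem.Dict.empty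
      dz.keys.foldl (fun dv rtopic =>
        let dv := dv.modify Vtopic PySem.Dict.empty (fun inner => inner.insert rtopic 0)
        top_words_Vtopic.foldl (fun dv tuple_word =>
          if (dz.getD rtopic []).contains tuple_word.1 then
            dv.modify Vtopic PySem.Dict.empty (fun inner => inner.modify rtopic 0 (· + 1))
          else dv) dv) dv) PySem.Dict.empty
  let diz_vtopic_max : PySem.Dict String (PySem.Dict String Int) :=
    diz_vtopic.keys.foldl (fun dmax vtopic =>
      let dmax := dmax.insert vtopic PySem.Dict.empty
      let sorted_vtopic := PySem.List.sorted (diz_vtopic.getD vtopic PySem.Dict.empty).items (fun x => x.2) true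
      match PySem.List.pyGet? sorted_vtopic 0, PySem.List.pyGet? sorted_vtopic 1 with
      | some s0, some s1 =>
          if s0.2 - s1.2 ≥ minDistanceWords then dmax.insert vtopic (PySem.Dict.mk [(s0.1, s0.2)]) else dmax
      | _, _ => dmax  -- Python raises IndexError here (fewer than two rtopics); outside Pre_
      ) PySem.Dict.empty
  diz_vtopic_max.items.map (fun p => (p.1, p.2.items))

-- ===== PORT B =====
-- one step of B's single-pass scan for the first-maximal count and the runner-up count
def bScanStep (s : String × Int × Option Int) (rc : String × Int) : String × Int × Option Int :=
  if s.2.1 < rc.2 then (rc.1, rc.2, some s.2.1)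
  else match s.2.2 with
    | none => (s.1, s.2.1, some rc.2)
    | some sc => if sc < rc.2 then (s.1, s.2.1, some rc.2) else s

def allocation_topwords_based_alt (diz_topwords : List (String × List String)) (described_topics : List (String × (List (String × Int)))) (minDistanceWords : Int) : List (String × List (String × Int)) :=
  let dz : PySem.Dict String (List String) := PySem.Dict.ofList diz_topwords
  let index : PySem.Dict String (List String) :=
    dz.items.foldl (fun index p =>
      (PySem.Set.ofList p.2).foldl (fun index w => index.modify w [] (fun ws => ws ++ [p.1])) index) PySem.Dict.empty
  let result : PySem.Dict String (PySem.Dict String Int) :=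
    described_topics.foldl (fun result topic_description =>
      let counts : PySem.Dict String Int := dz.keys.foldl (fun d r => d.insert r 0) PySem.Dict.empty
      let counts := topic_description.2.foldl (fun d tuple_word =>
        (index.getD tuple_word.1 []).foldl (fun d r => d.modify r 0 (· + 1)) d) counts
      match counts.items with
      | (r0, c0) :: rest =>
          match rest.foldl bScanStep (r0, c0, (none : Option Int)) with
          | (br, bc, some sc) =>
              result.insert topic_description.1 (if bc - sc ≥ minDistanceWords then PySem.Dict.mk [(br, bc)] else PySem.Dict.empty)
          | (_, _, none) => result.insert topic_description.1 PySem.Dict.empty  -- single rtopic: Python raises; outside Pre_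
      | [] => result.insert topic_description.1 PySem.Dict.empty  -- no rtopics: Python raises; outside Pre_
      ) PySem.Dict.empty
  result.items.map (fun p => (p.1, p.2.items))

-- ===== PRECONDITION & SPEC =====
-- Pre_ excludes exactly the inputs where Python A raises (IndexError: a nonempty
-- described_topics with fewer than two distinct rtopic keys); B raises there too.
def Pre_allocation_topwords_based (diz_topwords : List (String × List String)) (described_topics : List (String × (List (String × Int)))) (minDistanceWords : Int) : Prop :=
  described_topics = [] ∨ 2 ≤ (PySem.List.dedup (diz_topwords.map Prod.fst)).length
instance (diz_topwords : List (String × List String)) (described_topics : List (String × (List (String × Int)))) (minDistanceWords : Int) : Decidable (Pre_allocation_topwords_based diz_topwords described_topics minDistanceWords) := by unfold Pre_allocation_topwords_based; infer_instance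
def pvWitness_allocation_topwords_based : (List (String × List String)) × (List (String × (List (String × Int)))) × Int := ([("a", ["x"]), ("b", [])], [("v", [("x", 0)])], 0)

def Spec_allocation_topwords_based (diz_topwords : List (String × List String)) (described_topics : List (String × (List (String × Int)))) (minDistanceWords : Int) (out : List (String × List (String × Int))) : Prop := out = allocation_topwords_based_alt diz_topwords described_topics minDistanceWords
instance (diz_topwords : List (String × List String)) (described_topics : List (String × (List (String × Int)))) (minDistanceWords : Int) (out : List (String × List (String × Int))) : Decidable (Spec_allocation_topwords_based diz_topwords described_topics minDistanceWords out) := by unfold Spec_allocation_topwords_based; infer_instance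

-- ===== CLAIM (what is proved, stated in full; the proofs are below) =====
def Claim_equal_allocation_topwords_based : Prop := ∀ (diz_topwords : List (String × List String)) (described_topics : List (String × (List (String × Int)))) (minDistanceWords : Int), Dom_allocation_topwords_based diz_topwords described_topics minDistanceWords → Pre_allocation_topwords_based diz_topwords described_topics minDistanceWords → Spec_allocation_topwords_based diz_topwords described_topics minDistanceWords (allocation_topwords_based diz_topwords described_topics minDistanceWords)

-- ===== LEMMAS AND PROOFS =====

-- ---- generic dict helpers ----
theorem pvDictExt {κ ν : Type} (d₁ d₂ : PySem.Dict κ ν) (h : d₁.items = d₂.items) : d₁ = d₂ := by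
  cases d₁; cases d₂; simpa using h

theorem pvInsertInsertSelf {κ ν : Type} [BEq κ] [LawfulBEq κ] (d : PySem.Dict κ ν) (k : κ) (x v : ν) :
    (d.insert k x).insert k v = d.insert k v := by
  apply pvDictExt
  rw [PySem.Dict.items_insert_of_contains _ _ (PySem.Dict.contains_insert_self d k x)]
  by_cases hc : d.contains k = true
  · rw [PySem.Dict.items_insert_of_contains _ _ hc, PySem.Dict.items_insert_of_contains _ _ hc,
      List.map_map]
    apply List.map_congr_left
    intro p _
    by_cases h : (p.1 == k) = true <;> simp [h]
  · rw [PySem.Dict.items_insert_of_not_contains _ _ (by simpa using hc),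
      PySem.Dict.items_insert_of_not_contains _ _ (by simpa using hc)]
    have hcf : d.contains k = false := by simpa using hc
    have hmem : ∀ p ∈ d.items, (p.1 == k) = false := by
      intro p hp
      have := List.any_eq_false.mp hcf p hp
      simpa using this
    rw [List.map_append]
    congr 1
    · calc d.items.map _ = d.items.map id := by
            apply List.map_congr_left; intro p hp; simp [hmem p hp]
        _ = d.items := List.map_id d.items
    · simp

theorem pvModifyInsert {κ ν : Type} [BEq κ] [LawfulBEq κ] (d : PySem.Dict κ ν) (k : κ) (x d0 : ν) (f : ν → ν) :
    (d.insert k x).modify k d0 f = d.insert k (f x) := by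
  show (d.insert k x).insert k (f ((d.insert k x).getD k d0)) = _
  rw [PySem.Dict.getD_insert_self, pvInsertInsertSelf]

theorem pvKeysInsert {κ ν : Type} [BEq κ] [LawfulBEq κ] (d : PySem.Dict κ ν) (k : κ) (v : ν) :
    (d.insert k v).keys = PySem.Set.add d.keys k := by
  by_cases hm : k ∈ d.keys
  · rw [PySem.Dict.keys_insert_of_contains _ _ ((PySem.Dict.contains_iff_mem_keys d k).mpr hm),
      PySem.Set.add_of_mem hm]
  · have hcf : d.contains k = false := by
      cases h : d.contains k
      · rfl
      · exact absurd ((PySem.Dict.contains_iff_mem_keys d k).mp h) hm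
    rw [PySem.Dict.keys_insert_of_not_contains _ _ hcf, PySem.Set.add_of_not_mem hm]

theorem pvKeysOfList {κ ν : Type} [BEq κ] [LawfulBEq κ] (ps : List (κ × ν)) :
    (PySem.Dict.ofList ps).keys = PySem.List.dedup (ps.map Prod.fst) := by
  show (PySem.Dict.empty.update ps).keys = _
  rw [PySem.List.dedup_eq_ofList, ← PySem.Set.update_empty, PySem.Dict.update,
    PySem.Set.update_map_eq_foldl_add]
  have : ∀ (l : List (κ × ν)) (d : PySem.Dict κ ν),
      (l.foldl (fun acc p => acc.insert p.1 p.2) d).keys = l.foldl (fun s p => PySem.Set.add s p.1) d.keys := by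
    intro l
    induction l with
    | nil => intro d; rfl
    | cons p t ih => intro d; simp only [List.foldl_cons, ih, pvKeysInsert]
  rw [this]
  rfl

theorem pvGetDMkMap (vals : String → Int) (d0 : Int) :
    ∀ (rt : List String), rt.Nodup → ∀ r ∈ rt,
      (PySem.Dict.mk (rt.map (fun r => (r, vals r)))).getD r d0 = vals r := by
  intro rt
  induction rt with
  | nil => intro _ r hr; simp at hr
  | cons a t ih =>
    intro h r hr
    simp only [List.map_cons]
    rw [PySem.Dict.getD, PySem.Dict.get?_mk_cons]
    by_cases har : a = r
    · subst har; simp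
    · have hr' : r ∈ t := by
        rcases List.mem_cons.mp hr with h' | h'
        · exact absurd h'.symm har
        · exact h'
      rw [if_neg (by simp [har])]
      have := ih (List.Nodup.of_cons h) r hr'
      simpa [PySem.Dict.getD] using this

-- fresh-key inserts append
theorem pvFoldlInsertFresh {ν : Type} (f : String → ν) :
    ∀ (l : List String), l.Nodup → ∀ (d : PySem.Dict String ν), (∀ k ∈ l, d.contains k = false) →
      (l.foldl (fun dm v => dm.insert v (f v)) d).items = d.items ++ l.map (fun v => (v, f v)) := by
  intro l
  induction l with
  | nil => intro _ d _; simp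
  | cons a t ih =>
    intro hnd d hfr
    have hca : d.contains a = false := hfr a (List.mem_cons_self)
    have h1 : (d.insert a (f a)).items = d.items ++ [(a, f a)] :=
      PySem.Dict.items_insert_of_not_contains d (f a) hca
    have hfr' : ∀ k ∈ t, (d.insert a (f a)).contains k = false := by
      intro k hk
      rw [PySem.Dict.contains_insert]
      have hka : (k == a) = false := by
        simp only [beq_eq_false_iff_ne, ne_eq]
        intro he; exact (List.nodup_cons.mp hnd).1 (he ▸ hk)
      rw [hka, hfr k (List.mem_cons_of_mem a hk)]
      rfl
    simp only [List.foldl_cons]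
    rw [ih (List.Nodup.of_cons hnd) _ hfr', h1]
    simp

-- repeated +1 modifies on a just-inserted key
theorem pvModifyIter {α : Type} (r : String) :
    ∀ (l : List α) (d : PySem.Dict String Int) (x : Int),
      (l.foldl (fun d (_ : α) => d.modify r 0 (· + 1)) (d.insert r x)) = d.insert r (x + l.length) := by
  intro l
  induction l with
  | nil => intro d x; simp
  | cons a t ih =>
    intro d x
    simp only [List.foldl_cons]
    rw [pvModifyInsert, ih]
    simp only [List.length_cons]
    push_cast
    ring_nf

-- the per-vtopic count A computes for rtopic r
def pvCnt (dz : PySem.Dict String (List String)) (tws : List (String × Int)) (r : String) : Int :=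
  (tws.countP (fun tw => (dz.getD r []).contains tw.1) : Int)

-- A's inner double loop over rtopics builds exactly the counts table
theorem pvInnerAItems (dz : PySem.Dict String (List String)) (tws : List (String × Int)) :
    ∀ (l : List String), l.Nodup → ∀ (d : PySem.Dict String Int), (∀ k ∈ l, d.contains k = false) →
      (l.foldl (fun inner r =>
        tws.foldl (fun inner tw =>
          if (dz.getD r []).contains tw.1 then inner.modify r 0 (· + 1) else inner) (inner.insert r 0)) d).items
      = d.items ++ l.map (fun r => (r, pvCnt dz tws r)) := by
  intro l
  induction l with
  | nil => intro _ d _; simp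
  | cons a t ih =>
    intro hnd d hfr
    have hca : d.contains a = false := hfr a (List.mem_cons_self)
    have hstep : (tws.foldl (fun inner tw =>
        if (dz.getD a []).contains tw.1 then inner.modify a 0 (· + 1) else inner) (d.insert a 0))
        = d.insert a (pvCnt dz tws a) := by
      rw [PySem.List.foldl_if_eq_foldl_filter (fun tw : String × Int => (dz.getD a []).contains tw.1)
        (fun (inner : PySem.Dict String Int) (_ : String × Int) => inner.modify a 0 (· + 1))]
      rw [pvModifyIter]
      congr 1
      rw [pvCnt, List.countP_eq_length_filter]
      push_cast
      ring
    have h1 : (d.insert a (pvCnt dz tws a)).items = d.items ++ [(a, pvCnt dz tws a)] :=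
      PySem.Dict.items_insert_of_not_contains d _ hca
    have hfr' : ∀ k ∈ t, (d.insert a (pvCnt dz tws a)).contains k = false := by
      intro k hk
      rw [PySem.Dict.contains_insert]
      have hka : (k == a) = false := by
        simp only [beq_eq_false_iff_ne, ne_eq]
        intro he; exact (List.nodup_cons.mp hnd).1 (he ▸ hk)
      rw [hka, hfr k (List.mem_cons_of_mem a hk)]
      rfl
    simp only [List.foldl_cons]
    rw [hstep, ih (List.Nodup.of_cons hnd) _ hfr', h1]
    simp

-- bumping counters for a list of keys all present in the table
theorem pvOpsFold :
    ∀ (ops : List String) (rt : List String) (vals : String → Int), rt.Nodup → (∀ r ∈ ops, r ∈ rt) →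
      (ops.foldl (fun d r => d.modify r 0 (· + 1)) (PySem.Dict.mk (rt.map (fun r => (r, vals r))))).items
      = rt.map (fun r => (r, vals r + (ops.count r : Int))) := by
  intro ops
  induction ops with
  | nil => intro rt vals _ _; simp
  | cons a t ih =>
    intro rt vals hnd hmem
    have ha : a ∈ rt := hmem a (List.mem_cons_self)
    have hca : (PySem.Dict.mk (rt.map (fun r => (r, vals r)))).contains a = true := by
      rw [PySem.Dict.contains_iff_mem_keys, PySem.Dict.keys_mk]
      simp only [List.map_map]
      simpa using ha
    have hstep : (PySem.Dict.mk (rt.map (fun r => (r, vals r)))).modify a 0 (· + 1)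
        = PySem.Dict.mk (rt.map (fun r => (r, (fun r' => if r' = a then vals r' + 1 else vals r') r))) := by
      show (PySem.Dict.mk (rt.map (fun r => (r, vals r)))).insert a _ = _
      apply pvDictExt
      rw [PySem.Dict.items_insert_of_contains _ _ hca]
      show (rt.map (fun r => (r, vals r))).map _ = _
      rw [List.map_map]
      apply List.map_congr_left
      intro r _
      by_cases h : r = a
      · subst h
        simp [pvGetDMkMap vals 0 rt hnd r ha]
      · simp [h]
    simp only [List.foldl_cons]
    rw [hstep, ih rt _ hnd (fun r hr => hmem r (List.mem_cons_of_mem a hr))]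
    apply List.map_congr_left
    intro r _
    by_cases h : r = a
    · subst h
      simp [List.count_cons]
      push_cast
      ring
    · have : (a == r) = false := by simp [Ne.symm h]
      simp [List.count_cons, h, this]

-- B's inverted index, characterised
def pvIdx (dz : PySem.Dict String (List String)) : PySem.Dict String (List String) :=
  dz.items.foldl (fun index p =>
    (PySem.Set.ofList p.2).foldl (fun index w => index.modify w [] (fun ws => ws ++ [p.1])) index) PySem.Dict.empty

def pvQs (dz : PySem.Dict String (List String)) : List (String × String) :=
  dz.items.flatMap (fun p => (PySem.Set.ofList p.2).map (fun w' => (w', p.1)))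

theorem pvIdxGetD (dz : PySem.Dict String (List String)) (w : String) :
    (pvIdx dz).getD w [] = ((pvQs dz).filter (fun q => q.1 == w)).map (fun q => q.2) := by
  have h1 : ∀ (idx : PySem.Dict String (List String)) (p : String × List String),
      (PySem.Set.ofList p.2).foldl (fun index w => index.modify w [] (fun ws => ws ++ [p.1])) idx
      = ((PySem.Set.ofList p.2).map (fun w' => (w', p.1))).foldl
          (fun d (q : String × String) => d.modify q.1 [] (fun ws => ws ++ [q.2])) idx := by
    intro idx p
    rw [List.foldl_map]
  have h2 : pvIdx dz = (pvQs dz).foldl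
      (fun d (q : String × String) => d.modify q.1 [] (fun ws => ws ++ [q.2])) PySem.Dict.empty := by
    rw [pvIdx, pvQs, List.foldl_flatMap]
    exact PySem.List.foldl_congr_mem _ _ _ _ (fun acc p _ => h1 acc p)
  rw [h2, PySem.Dict.getD_foldl_modify_append]
  simp

theorem pvCountPNodup (w : String) :
    ∀ (sl : List String), sl.Nodup → sl.countP (fun x => x == w) = if w ∈ sl then 1 else 0 := by
  intro sl
  induction sl with
  | nil => simp
  | cons a t ih =>
    intro h
    rw [List.countP_cons, ih (List.Nodup.of_cons h)]
    by_cases haw : a = w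
    · subst haw
      have : a ∉ t := (List.nodup_cons.mp h).1
      simp [this]
    · simp [haw, Ne.symm haw]

theorem pvQsCountP :
    ∀ (its : List (String × List String)), (its.map Prod.fst).Nodup → ∀ (w r : String),
      ((its.flatMap (fun p => (PySem.Set.ofList p.2).map (fun w' => (w', p.1)))).countP (fun q => q.2 == r && q.1 == w))
      = if ((PySem.Dict.mk its).getD r []).contains w then 1 else 0 := by
  intro its
  induction its with
  | nil => intro _ w r; simp [PySem.Dict.getD, PySem.Dict.get?]
  | cons p t ih =>
    intro hnd w r
    obtain ⟨p1, p2⟩ := p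
    simp only [List.flatMap_cons, List.countP_append]
    have hhead : ((PySem.Set.ofList p2).map (fun w' => (w', p1))).countP (fun q => q.2 == r && q.1 == w)
        = if p1 = r ∧ w ∈ p2 then 1 else 0 := by
      rw [List.countP_map]
      have hfun : ((fun (q : String × String) => q.2 == r && q.1 == w) ∘ fun w' => (w', p1))
          = fun w' => (p1 == r) && (w' == w) := by
        funext w'; simp [Bool.and_comm]
      rw [hfun]
      by_cases hpr : p1 = r
      · rw [hpr]
        simp only [beq_self_eq_true, Bool.true_and]
        rw [pvCountPNodup w _ (PySem.Set.nodup_ofList p2)]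
        by_cases hw : w ∈ p2 <;> simp [hw, PySem.Set.mem_ofList, hpr]
      · have hf : (p1 == r) = false := by simp [hpr]
        rw [hf]
        simp [hpr]
    have hcons : (p1 :: t.map Prod.fst).Nodup := by simpa using hnd
    by_cases hpr : p1 = r
    · subst hpr
      have hnt : p1 ∉ t.map Prod.fst := (List.nodup_cons.mp hcons).1
      have htail : (t.flatMap (fun p => (PySem.Set.ofList p.2).map (fun w' => (w', p.1)))).countP
          (fun q => q.2 == p1 && q.1 == w) = 0 := by
        rw [ih (List.Nodup.of_cons hcons) w p1]
        have : (PySem.Dict.mk t).get? p1 = none := by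
          rw [PySem.Dict.get?_eq_none_iff_not_mem_keys, PySem.Dict.keys_mk]
          simpa using hnt
        simp [PySem.Dict.getD, this]
      rw [hhead, htail]
      have hgd : (PySem.Dict.mk ((p1, p2) :: t)).getD p1 [] = p2 := by
        rw [PySem.Dict.getD, PySem.Dict.get?_mk_cons]
        simp
      rw [hgd]
      by_cases hw : w ∈ p2 <;> simp [hw, List.contains_iff_mem]
    · have hgd : (PySem.Dict.mk ((p1, p2) :: t)).getD r [] = (PySem.Dict.mk t).getD r [] := by
        rw [PySem.Dict.getD, PySem.Dict.get?_mk_cons, if_neg (by simp [hpr]), ← PySem.Dict.getD]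
      rw [hhead, hgd, if_neg (by simp [hpr]), ih (List.Nodup.of_cons hcons) w r]
      simp

theorem pvIdxCount (dz : PySem.Dict String (List String)) (hk : dz.keys.Nodup) (w r : String) :
    ((pvIdx dz).getD w []).count r = if ((dz.getD r []).contains w) then 1 else 0 := by
  rw [pvIdxGetD]
  have hcount : (((pvQs dz).filter (fun q => q.1 == w)).map (fun q => q.2)).count r
      = ((pvQs dz).filter (fun q => q.1 == w)).countP (fun q => q.2 == r) := by
    rw [List.count, List.countP_map]
    rfl
  rw [hcount, List.countP_filter, pvQs]
  have heta : (PySem.Dict.mk dz.items) = dz := rfl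
  have := pvQsCountP dz.items (by simpa [PySem.Dict.keys] using hk) w r
  rw [heta] at this
  exact this

theorem pvOpsMem (dz : PySem.Dict String (List String)) (tws : List (String × Int)) :
    ∀ r ∈ tws.flatMap (fun tw => (pvIdx dz).getD tw.1 []), r ∈ dz.keys := by
  intro r hr
  rw [List.mem_flatMap] at hr
  obtain ⟨tw, htw, hr2⟩ := hr
  rw [pvIdxGetD] at hr2
  rw [List.mem_map] at hr2
  obtain ⟨q, hq, hq2⟩ := hr2
  rw [List.mem_filter] at hq
  rw [pvQs, List.mem_flatMap] at hq
  obtain ⟨⟨p, hp, hqp⟩, _⟩ := hq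
  rw [List.mem_map] at hqp
  obtain ⟨w', _, hw'⟩ := hqp
  rw [PySem.Dict.keys]
  rw [List.mem_map]
  exact ⟨p, hp, by rw [← hq2, ← hw']⟩

theorem pvOpsCount (dz : PySem.Dict String (List String)) (hk : dz.keys.Nodup) (tws : List (String × Int)) (r : String) :
    ((tws.flatMap (fun tw => (pvIdx dz).getD tw.1 [])).count r : Int) = pvCnt dz tws r := by
  induction tws with
  | nil => simp [pvCnt]
  | cons tw t ih =>
    have ih' : (t.flatMap (fun tw => (pvIdx dz).getD tw.1 [])).count r
        = t.countP (fun tw => (dz.getD r []).contains tw.1) := by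
      have := ih
      rw [pvCnt] at this
      exact_mod_cast this
    rw [List.flatMap_cons, List.count_append, pvCnt, List.countP_cons, pvIdxCount dz hk tw.1 r, ih']
    by_cases hcw : ((dz.getD r []).contains tw.1) = true <;> simp [hcw] <;> push_cast <;> omega

-- ---- two-phase outer dict lemma ----
theorem pvDvNodup {ν : Type} (g : (String × List (String × Int)) → ν) (pairs : List (String × List (String × Int))) :
    (pairs.foldl (fun d p => d.insert p.1 (g p)) PySem.Dict.empty).keys.Nodup := by
  induction pairs using List.reverseRecOn with
  | nil => simp [PySem.Dict.empty, PySem.Dict.keys]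
  | append_singleton t p ih =>
    rw [List.foldl_append, List.foldl_cons, List.foldl_nil]
    exact PySem.Dict.nodup_keys_insert _ _ _ ih

theorem pvMain2 {ν τ : Type} (g : (String × List (String × Int)) → ν) (F : ν → τ) (e : ν)
    (pairs : List (String × List (String × Int))) :
    (pairs.foldl (fun dm p => dm.insert p.1 (F (g p))) PySem.Dict.empty).items
      = (pairs.foldl (fun d p => d.insert p.1 (g p)) PySem.Dict.empty).keys.map
          (fun v => (v, F ((pairs.foldl (fun d p => d.insert p.1 (g p)) PySem.Dict.empty).getD v e))) := by
  induction pairs using List.reverseRecOn with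
  | nil => simp [PySem.Dict.empty, PySem.Dict.keys]
  | append_singleton t p ih =>
    simp only [List.foldl_append, List.foldl_cons, List.foldl_nil]
    have hkeysrm : (t.foldl (fun dm p => dm.insert p.1 (F (g p))) PySem.Dict.empty).keys
        = (t.foldl (fun d p => d.insert p.1 (g p)) PySem.Dict.empty).keys := by
      rw [PySem.Dict.keys, ih, List.map_map]
      simp [PySem.Dict.keys]
    by_cases hc : (t.foldl (fun d p => d.insert p.1 (g p)) PySem.Dict.empty).contains p.1 = true
    · have hcrm : (t.foldl (fun dm p => dm.insert p.1 (F (g p))) PySem.Dict.empty).contains p.1 = true := by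
        rw [PySem.Dict.contains_iff_mem_keys, hkeysrm, ← PySem.Dict.contains_iff_mem_keys]
        exact hc
      rw [PySem.Dict.items_insert_of_contains _ _ hcrm, ih, List.map_map,
        PySem.Dict.keys_insert_of_contains _ _ hc]
      apply List.map_congr_left
      intro v _
      by_cases hvp : v = p.1
      · subst hvp
        simp [PySem.Dict.getD_insert_self]
      · simp [PySem.Dict.getD_insert, hvp]
    · have hcf : (t.foldl (fun d p => d.insert p.1 (g p)) PySem.Dict.empty).contains p.1 = false := by
        simpa using hc
      have hcrm : (t.foldl (fun dm p => dm.insert p.1 (F (g p))) PySem.Dict.empty).contains p.1 = false := by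
        cases h : (t.foldl (fun dm p => dm.insert p.1 (F (g p))) PySem.Dict.empty).contains p.1
        · rfl
        · exfalso
          have := (PySem.Dict.contains_iff_mem_keys _ _).mp h
          rw [hkeysrm, ← PySem.Dict.contains_iff_mem_keys] at this
          rw [this] at hcf
          exact absurd hcf (by simp)
      rw [PySem.Dict.items_insert_of_not_contains _ _ hcrm, ih,
        PySem.Dict.keys_insert_of_not_contains _ _ hcf, List.map_append]
      congr 1
      · apply List.map_congr_left
        intro v hv
        have hvp : v ≠ p.1 := by
          intro he
          rw [he] at hv
          exact absurd ((PySem.Dict.contains_iff_mem_keys _ _).mpr hv) (by simp [hcf])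
        simp [PySem.Dict.getD_insert, hvp]
      · simp [PySem.Dict.getD_insert_self]

theorem pvTwoPhase {ν τ : Type} (g : (String × List (String × Int)) → ν) (F : ν → τ) (e : ν)
    (pairs : List (String × List (String × Int))) :
    ((pairs.foldl (fun d p => d.insert p.1 (g p)) PySem.Dict.empty).keys.foldl
        (fun dm v => dm.insert v (F ((pairs.foldl (fun d p => d.insert p.1 (g p)) PySem.Dict.empty).getD v e))) PySem.Dict.empty)
      = pairs.foldl (fun dm p => dm.insert p.1 (F (g p))) PySem.Dict.empty := by
  apply pvDictExt
  rw [pvFoldlInsertFresh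
      (fun v => F ((pairs.foldl (fun d p => d.insert p.1 (g p)) PySem.Dict.empty).getD v e))
      _ (pvDvNodup g pairs) PySem.Dict.empty (fun k _ => PySem.Dict.contains_empty k),
    pvMain2 g F e pairs]
  rfl

-- ---- selection: sorted-based (A) vs single-pass scan (B) ----
def pvSelA (minD : Int) (c : PySem.Dict String Int) : PySem.Dict String Int :=
  match PySem.List.pyGet? (PySem.List.sorted c.items (fun x => x.2) true) 0,
        PySem.List.pyGet? (PySem.List.sorted c.items (fun x => x.2) true) 1 with
  | some s0, some s1 => if s0.2 - s1.2 ≥ minD then PySem.Dict.mk [(s0.1, s0.2)] else PySem.Dict.empty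
  | _, _ => PySem.Dict.empty

def pvSelB (minD : Int) (c : PySem.Dict String Int) : PySem.Dict String Int :=
  match c.items with
  | (r0, c0) :: rest =>
      match rest.foldl bScanStep (r0, c0, (none : Option Int)) with
      | (br, bc, some sc) => if bc - sc ≥ minD then PySem.Dict.mk [(br, bc)] else PySem.Dict.empty
      | (_, _, none) => PySem.Dict.empty
  | [] => PySem.Dict.empty

def pvFM (z : String × Int) (zs : List (String × Int)) : String × Int :=
  zs.foldl (fun b y => if b.2 < y.2 then y else b) z

def pvIsMax (xs : List Int) (v : Int) : Prop := v ∈ xs ∧ ∀ y ∈ xs, y ≤ v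

theorem pvIsMaxUnique {xs : List Int} {a b : Int} (ha : pvIsMax xs a) (hb : pvIsMax xs b) : a = b :=
  le_antisymm (hb.2 a ha.1) (ha.2 b hb.1)

theorem pvIsMaxPerm {xs ys : List Int} (h : xs.Perm ys) {v : Int} (hv : pvIsMax xs v) : pvIsMax ys v :=
  ⟨h.mem_iff.mp hv.1, fun y hy => hv.2 y (h.mem_iff.mpr hy)⟩

theorem pvFMMax (zs : List (String × Int)) (z : String × Int) :
    pvFM z zs ∈ z :: zs ∧ ∀ x ∈ z :: zs, x.2 ≤ (pvFM z zs).2 := by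
  induction zs generalizing z with
  | nil =>
    refine ⟨List.mem_cons_self, ?_⟩
    intro x hx
    rcases List.mem_cons.mp hx with h | h
    · rw [h]; exact le_refl _
    · simp at h
  | cons y t ih =>
    rw [show pvFM z (y :: t) = pvFM (if z.2 < y.2 then y else z) t from by
      rw [pvFM, pvFM, List.foldl_cons]]
    obtain ⟨hm, hb⟩ := ih (if z.2 < y.2 then y else z)
    constructor
    · by_cases hzy : z.2 < y.2
      · simp only [if_pos hzy] at hm ⊢
        rcases List.mem_cons.mp hm with h | h
        · rw [h]; exact List.mem_cons_of_mem _ List.mem_cons_self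
        · exact List.mem_cons_of_mem _ (List.mem_cons_of_mem _ h)
      · simp only [if_neg hzy] at hm ⊢
        rcases List.mem_cons.mp hm with h | h
        · rw [h]; exact List.mem_cons_self
        · exact List.mem_cons_of_mem _ (List.mem_cons_of_mem _ h)
    · intro x hx
      have hhead : (if z.2 < y.2 then y else z).2 ≤ (pvFM (if z.2 < y.2 then y else z) t).2 :=
        hb _ List.mem_cons_self
      have hz : z.2 ≤ (if z.2 < y.2 then y else z).2 := by
        by_cases hzy : z.2 < y.2 <;> simp [hzy] <;> omega
      have hy : y.2 ≤ (if z.2 < y.2 then y else z).2 := by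
        by_cases hzy : z.2 < y.2 <;> simp [hzy] <;> omega
      rcases List.mem_cons.mp hx with h | h
      · rw [h]; exact le_trans hz hhead
      · rcases List.mem_cons.mp h with h2 | h2
        · rw [h2]; exact le_trans hy hhead
        · exact hb x (List.mem_cons_of_mem _ h2)

theorem pvHeads (l : List (String × Int)) :
    (PySem.List.sorted l (fun x => x.2) true).head? =
      l.foldl (fun o y => match o with
        | none => some y
        | some b => some (if b.2 < y.2 then y else b)) none := by
  induction l using List.reverseRecOn with
  | nil => rfl
  | append_singleton t y ih =>
    rw [PySem.List.sorted_rev_eq_foldl_insertBy, List.foldl_append, List.foldl_cons, List.foldl_nil,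
      ← PySem.List.sorted_rev_eq_foldl_insertBy, List.foldl_append, List.foldl_cons, List.foldl_nil]
    cases hs : PySem.List.sorted t (fun x => x.2) true with
    | nil =>
      have ht : t = [] := (PySem.List.sorted_eq_nil_iff _ _ _).mp hs
      subst ht
      rfl
    | cons m ttl =>
      have ihm : (t.foldl (fun o y => match o with
          | none => some y
          | some b => some (if b.2 < y.2 then y else b)) none) = some m := by
        rw [← ih, hs]; rfl
      rw [ihm]
      by_cases hmy : m.2 < y.2
      · rw [show PySem.List.insertBy (fun a b => decide (b.2 < a.2)) y (m :: ttl) = y :: m :: ttl from by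
          simp [PySem.List.insertBy, hmy]]
        simp [hmy]
      · rw [show PySem.List.insertBy (fun a b => decide (b.2 < a.2)) y (m :: ttl)
            = m :: PySem.List.insertBy (fun a b => decide (b.2 < a.2)) y ttl from by
          simp [PySem.List.insertBy, hmy]]
        simp [hmy]

theorem pvFoldOpt (zs : List (String × Int)) (z : String × Int) :
    (z :: zs).foldl (fun o y => match o with
        | none => some y
        | some b => some (if b.2 < y.2 then y else b)) none = some (pvFM z zs) := by
  have key : ∀ (t : List (String × Int)) (b : String × Int),
      t.foldl (fun o y => match o with
        | none => some y
        | some b => some (if b.2 < y.2 then y else b)) (some b)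
      = some (t.foldl (fun b y => if b.2 < y.2 then y else b) b) := by
    intro t
    induction t with
    | nil => intro b; rfl
    | cons y ty ih => intro b; rw [List.foldl_cons, List.foldl_cons]; exact ih _
  rw [List.foldl_cons]
  exact key zs z

theorem pvScan (zs : List (String × Int)) (z : String × Int) (hne : zs ≠ []) (hnd : (z :: zs).Nodup) :
    ∃ sc, zs.foldl bScanStep (z.1, z.2, (none : Option Int)) = ((pvFM z zs).1, (pvFM z zs).2, some sc)
      ∧ pvIsMax (((z :: zs).erase (pvFM z zs)).map (fun x => x.2)) sc := by
  revert hne hnd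
  induction zs using List.reverseRecOn with
  | nil => intro hne _; exact absurd rfl hne
  | append_singleton l y ih =>
    intro _ hnd
    by_cases hl : l = []
    · subst hl
      rw [List.nil_append] at hnd ⊢
      rw [List.foldl_cons, List.foldl_nil, pvFM, List.foldl_cons, List.foldl_nil]
      by_cases hzy : z.2 < y.2
      · refine ⟨z.2, ?_, ?_⟩
        · simp [bScanStep, hzy]
        · have hyz : ¬ (z == y) = true := by
            intro he
            rw [eq_of_beq he] at hzy
            exact absurd hzy (lt_irrefl _)
          rw [if_pos hzy, List.erase_cons, if_neg hyz, List.erase_cons, if_pos (by simp)]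
          exact ⟨by simp, by intro c hc; simp at hc; omega⟩
      · refine ⟨y.2, ?_, ?_⟩
        · simp [bScanStep, hzy]
        · rw [if_neg hzy, List.erase_cons, if_pos (by simp)]
          exact ⟨by simp, by intro c hc; simp at hc; omega⟩
    · have hndl : (z :: l).Nodup :=
        List.Nodup.sublist (List.Sublist.cons₂ z (List.sublist_append_left l [y])) hnd
      obtain ⟨sc, hfold, hmax⟩ := ih hl hndl
      rw [List.foldl_append, List.foldl_cons, List.foldl_nil, hfold]
      have hfm : pvFM z (l ++ [y]) = if (pvFM z l).2 < y.2 then y else pvFM z l := by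
        rw [pvFM, pvFM, List.foldl_append, List.foldl_cons, List.foldl_nil]
      obtain ⟨hmem, hbound⟩ := pvFMMax l z
      obtain ⟨hscm, hscb⟩ := hmax
      by_cases hby : (pvFM z l).2 < y.2
      · refine ⟨(pvFM z l).2, ?_, ?_⟩
        · rw [hfm, if_pos hby]; simp [bScanStep, hby]
        · rw [hfm, if_pos hby]
          have hyn : y ∉ z :: l := by
            intro hyl
            exact absurd (hbound y hyl) (by omega)
          have herase : (z :: (l ++ [y])).erase y = z :: l := by
            rw [show z :: (l ++ [y]) = (z :: l) ++ [y] from rfl, List.erase_append, if_neg hyn]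
            simp
          rw [herase]
          exact ⟨List.mem_map.mpr ⟨pvFM z l, hmem, rfl⟩, fun c hc => by
            obtain ⟨x, hx, hxc⟩ := List.mem_map.mp hc
            rw [← hxc]; exact hbound x hx⟩
      · refine ⟨if sc < y.2 then y.2 else sc, ?_, ?_⟩
        · rw [hfm, if_neg hby]
          by_cases hsy : sc < y.2 <;> simp [bScanStep, hby, hsy]
        · rw [hfm, if_neg hby]
          have herase : (z :: (l ++ [y])).erase (pvFM z l) = ((z :: l).erase (pvFM z l)) ++ [y] := by
            rw [show z :: (l ++ [y]) = (z :: l) ++ [y] from rfl, List.erase_append, if_pos hmem]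
          rw [herase, List.map_append]
          by_cases hsy : sc < y.2
          · refine ⟨?_, ?_⟩
            · rw [if_pos hsy]; exact List.mem_append.mpr (Or.inr (by simp))
            · rw [if_pos hsy]; intro c hc
              rcases List.mem_append.mp hc with h | h
              · exact le_trans (hscb c h) (le_of_lt hsy)
              · simp at h; omega
          · refine ⟨?_, ?_⟩
            · rw [if_neg hsy]; exact List.mem_append.mpr (Or.inl hscm)
            · rw [if_neg hsy]; intro c hc
              rcases List.mem_append.mp hc with h | h
              · exact hscb c h
              · simp at h; omega

theorem pvSelEq (minD : Int) (c : PySem.Dict String Int) (hlen : 2 ≤ c.items.length)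
    (hnd : (c.items.map Prod.fst).Nodup) : pvSelA minD c = pvSelB minD c := by
  rcases hc : c.items with _ | ⟨z, zs⟩
  · rw [hc] at hlen; simp at hlen
  · obtain ⟨z1, z2⟩ := z
    have hzs : zs ≠ [] := by
      intro he; rw [hc, he] at hlen; simp at hlen
    rw [hc] at hnd
    have hndp : ((z1, z2) :: zs).Nodup := List.Nodup.of_map Prod.fst hnd
    obtain ⟨sc, hfold, hmax⟩ := pvScan zs (z1, z2) hzs hndp
    have hlen2 : 2 ≤ (PySem.List.sorted c.items (fun x => x.2) true).length := by
      rw [PySem.List.length_sorted, hc]; rw [hc] at hlen; exact hlen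
    rcases hs : PySem.List.sorted c.items (fun x => x.2) true with _ | ⟨s0, stl⟩
    · rw [hs] at hlen2; simp at hlen2
    rcases hstl : stl with _ | ⟨s1, t⟩
    · rw [hs, hstl] at hlen2; simp at hlen2
    subst hstl
    -- head of the sorted list is the first argmax
    have hhead : s0 = pvFM (z1, z2) zs := by
      have h1 := pvHeads c.items
      rw [hs, hc, pvFoldOpt] at h1
      simpa using h1
    -- the second sorted element carries the max of the rest
    have hperm : (s0 :: s1 :: t).Perm ((z1, z2) :: zs) := by
      rw [← hs, ← hc]; exact PySem.List.sorted_perm _ _ _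
    obtain ⟨hs0m, hpermtail⟩ := List.cons_perm_iff_perm_erase.mp hperm
    have hpw := PySem.List.sorted_pairwise_rev c.items (fun x => x.2)
    rw [hs] at hpw
    have hpw1 : ∀ x ∈ t, x.2 ≤ s1.2 := (List.pairwise_cons.mp (List.pairwise_cons.mp hpw).2).1
    have hmaxA : pvIsMax ((s1 :: t).map (fun x => x.2)) s1.2 := by
      refine ⟨by simp, ?_⟩
      intro cc hcc
      obtain ⟨x, hx, hxc⟩ := List.mem_map.mp hcc
      rcases List.mem_cons.mp hx with h | h
      · rw [← hxc, h]
      · rw [← hxc]; exact hpw1 x h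
    have hmaxA' : pvIsMax ((((z1, z2) :: zs).erase s0).map (fun x => x.2)) s1.2 :=
      pvIsMaxPerm (hpermtail.map (fun x => x.2)) hmaxA
    rw [hhead] at hmaxA'
    have hsc : sc = s1.2 := pvIsMaxUnique hmax hmaxA'
    -- now compute both selections
    have hs' : PySem.List.sorted ((z1, z2) :: zs) (fun x => x.2) true = s0 :: s1 :: t := by
      rw [← hc]; exact hs
    rw [pvSelA, pvSelB, hc, hs']
    show (match PySem.List.pyGet? (s0 :: s1 :: t) 0, PySem.List.pyGet? (s0 :: s1 :: t) 1 with
      | some s0, some s1 => if s0.2 - s1.2 ≥ minD then PySem.Dict.mk [(s0.1, s0.2)] else PySem.Dict.empty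
      | _, _ => PySem.Dict.empty)
      = match zs.foldl bScanStep (z1, z2, (none : Option Int)) with
        | (br, bc, some sc) => if bc - sc ≥ minD then PySem.Dict.mk [(br, bc)] else PySem.Dict.empty
        | (_, _, none) => PySem.Dict.empty
    have hfold' : zs.foldl bScanStep (z1, z2, (none : Option Int))
        = ((pvFM (z1, z2) zs).1, (pvFM (z1, z2) zs).2, some sc) := hfold
    rw [hfold', hsc]
    have hget0 : PySem.List.pyGet? (s0 :: s1 :: t) 0 = some s0 := by
      simp [PySem.List.pyGet?, PySem.List.pyIdx?]
      rw [if_pos (by positivity : (0:Int) ≤ (t.length : Int) + 1)]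
      simp
    have hget1 : PySem.List.pyGet? (s0 :: s1 :: t) 1 = some s1 := by
      simp [PySem.List.pyGet?, PySem.List.pyIdx?]
    rw [hget0, hget1, hhead]

-- ---- assembling the per-vtopic tables ----
theorem pvInnerCol (P : (String × Int) → Bool) (tws : List (String × Int))
    (dv : PySem.Dict String (PySem.Dict String Int)) (v r : String) (i : PySem.Dict String Int) :
    tws.foldl (fun dv tw =>
        if P tw then dv.modify v PySem.Dict.empty (fun inner => inner.modify r 0 (· + 1)) else dv)
      (dv.insert v i)
    = dv.insert v (tws.foldl (fun i tw => if P tw then i.modify r 0 (· + 1) else i) i) := by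
  induction tws generalizing i with
  | nil => rfl
  | cons tw t ih =>
    rw [List.foldl_cons, List.foldl_cons]
    by_cases hP : P tw = true
    · rw [if_pos hP, if_pos hP, pvModifyInsert]
      exact ih _
    · rw [if_neg hP, if_neg hP]
      exact ih _

theorem pvCollapse (P : String → (String × Int) → Bool) (tws : List (String × Int)) :
    ∀ (l : List String) (dv : PySem.Dict String (PySem.Dict String Int)) (v : String) (inner : PySem.Dict String Int),
    l.foldl (fun dv r =>
        tws.foldl (fun dv tw =>
          if P r tw then dv.modify v PySem.Dict.empty (fun inner => inner.modify r 0 (· + 1)) else dv)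
        (dv.modify v PySem.Dict.empty (fun inner => inner.insert r 0)))
      (dv.insert v inner)
    = dv.insert v (l.foldl (fun i r =>
        tws.foldl (fun i tw => if P r tw then i.modify r 0 (· + 1) else i) (i.insert r 0)) inner) := by
  intro l
  induction l with
  | nil => intro dv v inner; rfl
  | cons r t ih =>
    intro dv v inner
    rw [List.foldl_cons, List.foldl_cons, pvModifyInsert, pvInnerCol (P r) tws]
    exact ih dv v _

theorem pvEntryA (dz : PySem.Dict String (List String)) (hk : dz.keys.Nodup)
    (dv : PySem.Dict String (PySem.Dict String Int)) (p : String × List (String × Int)) :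
    (dz.keys.foldl (fun dv rtopic =>
        p.2.foldl (fun dv tuple_word =>
          if (dz.getD rtopic []).contains tuple_word.1 then
            dv.modify p.1 PySem.Dict.empty (fun inner => inner.modify rtopic 0 (· + 1))
          else dv) (dv.modify p.1 PySem.Dict.empty (fun inner => inner.insert rtopic 0)))
      (dv.insert p.1 PySem.Dict.empty))
    = dv.insert p.1 (PySem.Dict.mk (dz.keys.map (fun r => (r, pvCnt dz p.2 r)))) := by
  rw [pvCollapse (fun r tw => (dz.getD r []).contains tw.1) p.2 dz.keys dv p.1 PySem.Dict.empty]
  congr 1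
  apply pvDictExt
  rw [pvInnerAItems dz p.2 dz.keys hk PySem.Dict.empty (fun k _ => PySem.Dict.contains_empty k)]
  simp [PySem.Dict.empty]

theorem pvCountsB (dz : PySem.Dict String (List String)) (hk : dz.keys.Nodup) (tws : List (String × Int)) :
    (tws.foldl (fun d tuple_word =>
        ((pvIdx dz).getD tuple_word.1 []).foldl (fun d r => d.modify r 0 (· + 1)) d)
      (dz.keys.foldl (fun d r => d.insert r 0) PySem.Dict.empty))
    = PySem.Dict.mk (dz.keys.map (fun r => (r, pvCnt dz tws r))) := by
  have h0 : dz.keys.foldl (fun d r => d.insert r 0) PySem.Dict.empty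
      = PySem.Dict.mk (dz.keys.map (fun r => (r, (0 : Int)))) := by
    apply pvDictExt
    rw [pvFoldlInsertFresh (fun _ => (0 : Int)) dz.keys hk PySem.Dict.empty
      (fun k _ => PySem.Dict.contains_empty k)]
    simp [PySem.Dict.empty]
  rw [h0, ← List.foldl_flatMap]
  apply pvDictExt
  rw [pvOpsFold (tws.flatMap (fun tw => (pvIdx dz).getD tw.1 [])) dz.keys (fun _ => 0) hk
      (pvOpsMem dz tws)]
  show _ = dz.keys.map (fun r => (r, pvCnt dz tws r))
  apply List.map_congr_left
  intro r _
  rw [zero_add, pvOpsCount dz hk tws r]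

-- ---- final assembly ----
def pvGA (dz : PySem.Dict String (List String)) (p : String × List (String × Int)) : PySem.Dict String Int :=
  PySem.Dict.mk (dz.keys.map (fun r => (r, pvCnt dz p.2 r)))

theorem pvPhase2Body (minD : Int) (d : PySem.Dict String Int)
    (dm : PySem.Dict String (PySem.Dict String Int)) (v : String) :
    (match PySem.List.pyGet? (PySem.List.sorted d.items (fun x => x.2) true) 0,
           PySem.List.pyGet? (PySem.List.sorted d.items (fun x => x.2) true) 1 with
     | some s0, some s1 =>
         if s0.2 - s1.2 ≥ minD then (dm.insert v PySem.Dict.empty).insert v (PySem.Dict.mk [(s0.1, s0.2)])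
         else dm.insert v PySem.Dict.empty
     | _, _ => dm.insert v PySem.Dict.empty)
    = dm.insert v (pvSelA minD d) := by
  rw [pvSelA]
  cases h0 : PySem.List.pyGet? (PySem.List.sorted d.items (fun x => x.2) true) 0 with
  | none => rfl
  | some s0 =>
    cases h1 : PySem.List.pyGet? (PySem.List.sorted d.items (fun x => x.2) true) 1 with
    | none => rfl
    | some s1 =>
      by_cases hif : s0.2 - s1.2 ≥ minD
      · simp only [if_pos hif]
        rw [pvInsertInsertSelf]
      · simp only [if_neg hif]

theorem pvBBody (minD : Int) (c : PySem.Dict String Int)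
    (res : PySem.Dict String (PySem.Dict String Int)) (v : String) :
    (match c.items with
     | (r0, c0) :: rest =>
         match rest.foldl bScanStep (r0, c0, (none : Option Int)) with
         | (br, bc, some sc) =>
             res.insert v (if bc - sc ≥ minD then PySem.Dict.mk [(br, bc)] else PySem.Dict.empty)
         | (_, _, none) => res.insert v PySem.Dict.empty
     | [] => res.insert v PySem.Dict.empty)
    = res.insert v (pvSelB minD c) := by
  rcases h : c.items with _ | ⟨⟨r0, c0⟩, rest⟩
  · rw [pvSelB, h]
  · rw [pvSelB, h]
    rcases hf : rest.foldl bScanStep (r0, c0, (none : Option Int)) with ⟨br, bc, _ | sc⟩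
    · simp only [hf]
    · simp only [hf]

theorem pvAeq (dt : List (String × List String)) (dd : List (String × List (String × Int))) (m : Int) :
    allocation_topwords_based dt dd m
    = (dd.foldl (fun dm p => dm.insert p.1 (pvSelA m (pvGA (PySem.Dict.ofList dt) p)))
        PySem.Dict.empty).items.map (fun p => (p.1, p.2.items)) := by
  have hk := PySem.Dict.nodup_keys_ofList dt
  simp only [allocation_topwords_based]
  have e1 : (dd.foldl
      (fun dv topic_description =>
        List.foldl
          (fun dv rtopic =>
            List.foldl
              (fun dv tuple_word =>
                if ((PySem.Dict.ofList dt).getD rtopic []).contains tuple_word.1 = true then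
                  dv.modify topic_description.1 PySem.Dict.empty fun inner =>
                    inner.modify rtopic 0 fun x => x + 1
                else dv)
              (dv.modify topic_description.1 PySem.Dict.empty fun inner => inner.insert rtopic 0)
              topic_description.2)
          (dv.insert topic_description.1 PySem.Dict.empty) (PySem.Dict.ofList dt).keys)
      PySem.Dict.empty)
      = dd.foldl (fun dv p => dv.insert p.1 (pvGA (PySem.Dict.ofList dt) p)) PySem.Dict.empty :=
    PySem.List.foldl_congr_mem _ _ _ _ (fun acc p _ => pvEntryA (PySem.Dict.ofList dt) hk acc p)
  rw [e1]
  have e2 : ((dd.foldl (fun dv p => dv.insert p.1 (pvGA (PySem.Dict.ofList dt) p)) PySem.Dict.empty).keys.foldl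
      (fun dmax vtopic =>
        match
          PySem.List.pyGet? (PySem.List.sorted (((dd.foldl (fun dv p => dv.insert p.1 (pvGA (PySem.Dict.ofList dt) p)) PySem.Dict.empty).getD vtopic PySem.Dict.empty).items) (fun x => x.2) true) 0,
          PySem.List.pyGet? (PySem.List.sorted (((dd.foldl (fun dv p => dv.insert p.1 (pvGA (PySem.Dict.ofList dt) p)) PySem.Dict.empty).getD vtopic PySem.Dict.empty).items) (fun x => x.2) true) 1 with
        | some s0, some s1 =>
            if s0.2 - s1.2 ≥ m then (dmax.insert vtopic PySem.Dict.empty).insert vtopic (PySem.Dict.mk [(s0.1, s0.2)])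
            else dmax.insert vtopic PySem.Dict.empty
        | _, _ => dmax.insert vtopic PySem.Dict.empty) PySem.Dict.empty)
      = ((dd.foldl (fun dv p => dv.insert p.1 (pvGA (PySem.Dict.ofList dt) p)) PySem.Dict.empty).keys.foldl
          (fun dm v => dm.insert v (pvSelA m ((dd.foldl (fun dv p => dv.insert p.1 (pvGA (PySem.Dict.ofList dt) p)) PySem.Dict.empty).getD v PySem.Dict.empty))) PySem.Dict.empty) :=
    PySem.List.foldl_congr_mem _ _ _ _ (fun acc v _ => pvPhase2Body m _ acc v)
  rw [e2, pvTwoPhase (pvGA (PySem.Dict.ofList dt)) (pvSelA m) PySem.Dict.empty dd]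

theorem pvBeq (dt : List (String × List String)) (dd : List (String × List (String × Int))) (m : Int) :
    allocation_topwords_based_alt dt dd m
    = (dd.foldl (fun dm p => dm.insert p.1 (pvSelB m (pvGA (PySem.Dict.ofList dt) p)))
        PySem.Dict.empty).items.map (fun p => (p.1, p.2.items)) := by
  have hk := PySem.Dict.nodup_keys_ofList dt
  simp only [allocation_topwords_based_alt]
  have e1 : (dd.foldl
      (fun result topic_description =>
        match
          (List.foldl
              (fun d tuple_word =>
                List.foldl (fun d r => d.modify r 0 fun x => x + 1) d
                  ((List.foldl
                        (fun index p =>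
                          List.foldl (fun index w => index.modify w [] fun ws => ws ++ [p.1]) index
                            (PySem.Set.ofList p.2))
                        PySem.Dict.empty (PySem.Dict.ofList dt).items).getD
                    tuple_word.1 []))
              (List.foldl (fun d r => d.insert r 0) PySem.Dict.empty (PySem.Dict.ofList dt).keys)
              topic_description.2).items with
        | (r0, c0) :: rest =>
          match List.foldl bScanStep (r0, c0, none) rest with
          | (br, bc, some sc) =>
            result.insert topic_description.1 (if bc - sc ≥ m then PySem.Dict.mk [(br, bc)] else PySem.Dict.empty)
          | (_, _, none) => result.insert topic_description.1 PySem.Dict.empty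
        | [] => result.insert topic_description.1 PySem.Dict.empty)
      PySem.Dict.empty)
      = dd.foldl (fun dm p => dm.insert p.1 (pvSelB m (pvGA (PySem.Dict.ofList dt) p))) PySem.Dict.empty := by
    apply PySem.List.foldl_congr_mem
    intro acc p _
    have hcounts : (List.foldl
        (fun d tuple_word =>
          List.foldl (fun d r => d.modify r 0 fun x => x + 1) d
            ((List.foldl
                  (fun index p =>
                    List.foldl (fun index w => index.modify w [] fun ws => ws ++ [p.1]) index
                      (PySem.Set.ofList p.2))
                  PySem.Dict.empty (PySem.Dict.ofList dt).items).getD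
              tuple_word.1 []))
        (List.foldl (fun d r => d.insert r 0) PySem.Dict.empty (PySem.Dict.ofList dt).keys)
        p.2) = pvGA (PySem.Dict.ofList dt) p :=
      pvCountsB (PySem.Dict.ofList dt) hk p.2
    rw [hcounts]
    exact pvBBody m (pvGA (PySem.Dict.ofList dt) p) acc p.1
  rw [e1]

-- ===== VERDICT (by name: the statement is the Claim_ definition above) =====
theorem allocation_topwords_based_spec : Claim_equal_allocation_topwords_based := by
  unfold Claim_equal_allocation_topwords_based
  intro dt dd m _ hpre
  unfold Spec_allocation_topwords_based
  rw [pvAeq, pvBeq]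
  rcases hpre with hemp | hge
  · subst hemp; rfl
  · have hk := PySem.Dict.nodup_keys_ofList dt
    have hlen : 2 ≤ (PySem.Dict.ofList dt).keys.length := by
      rw [pvKeysOfList]; exact hge
    have hsel : ∀ (acc : PySem.Dict String (PySem.Dict String Int)), ∀ p ∈ dd,
        acc.insert p.1 (pvSelA m (pvGA (PySem.Dict.ofList dt) p))
        = acc.insert p.1 (pvSelB m (pvGA (PySem.Dict.ofList dt) p)) := by
      intro acc p _
      congr 1
      apply pvSelEq
      · show 2 ≤ ((PySem.Dict.ofList dt).keys.map
          (fun r => (r, pvCnt (PySem.Dict.ofList dt) p.2 r))).length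
        simpa using hlen
      · show (((PySem.Dict.ofList dt).keys.map
          (fun r => (r, pvCnt (PySem.Dict.ofList dt) p.2 r))).map Prod.fst).Nodup
        rw [List.map_map]
        have hcomp : (Prod.fst ∘ fun r => (r, pvCnt (PySem.Dict.ofList dt) p.2 r)) = id := by
          funext r; rfl
        rw [hcomp, List.map_id]
        exact hk
    rw [PySem.List.foldl_congr_mem dd
      (fun dm p => dm.insert p.1 (pvSelA m (pvGA (PySem.Dict.ofList dt) p)))
      (fun dm p => dm.insert p.1 (pvSelB m (pvGA (PySem.Dict.ofList dt) p)))
      PySem.Dict.empty hsel]
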